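-- pv_equiv track=rewrite | github.com/zehaozhou/CSC410 | A5/source/Q8.py | solve
-- ===== SOURCE A (Python) =====
-- def solve(x,y):
--     if x == 0 or y == 0 or x == y:
--         return "1"
--
--     p2 = [(1,2),(2,1)]
--
--     for i in range(x+1):
--         for j in range(y+1):
--             check = [reachable(i, j, cell[0], cell[1]) for cell in p2]
--             if not any(check):
--                 p2.append((i,j))
--
--     if (x, y) in p2:
--         return "2"
--     return "1"
--
-- def reachable(a, b, x, y):
--     return a == x or b == y or a-x == b-y
-- ===== SOURCE B (Python) =====
-- def first_free(i, y, cols, diags):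
--     for j in range(y + 1):
--         if j not in cols and (i - j) not in diags:
--             return j
--     return None
--
-- def solve(x, y):
--     if x == 0 or y == 0 or x == y:
--         return "1"
--     rows = {1, 2}
--     cols = {2, 1}
--     diags = {-1, 1}
--     members = {(1, 2), (2, 1)}
--     for i in range(x + 1):
--         if i not in rows:
--             j = first_free(i, y, cols, diags)
--             if j is not None:
--                 rows.add(i)
--                 cols.add(j)
--                 diags.add(i - j)
--                 members.add((i, j))
--     return "2" if (x, y) in members else "1"
-- ===== Notes on version B (the rewrite author's own statement) =====
-- stated objective: faster
-- what changed: A rescans the whole list of found P-positions for every cell of the (x+1)x(y+1) grid; B instead maintains three blocked-index sets (used rows, columns and diagonals), skips a row as soon as it is blocked and stops scanning a row at the first free column, so the per-cell scan over the growing list disappears.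
import Mathlib
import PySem

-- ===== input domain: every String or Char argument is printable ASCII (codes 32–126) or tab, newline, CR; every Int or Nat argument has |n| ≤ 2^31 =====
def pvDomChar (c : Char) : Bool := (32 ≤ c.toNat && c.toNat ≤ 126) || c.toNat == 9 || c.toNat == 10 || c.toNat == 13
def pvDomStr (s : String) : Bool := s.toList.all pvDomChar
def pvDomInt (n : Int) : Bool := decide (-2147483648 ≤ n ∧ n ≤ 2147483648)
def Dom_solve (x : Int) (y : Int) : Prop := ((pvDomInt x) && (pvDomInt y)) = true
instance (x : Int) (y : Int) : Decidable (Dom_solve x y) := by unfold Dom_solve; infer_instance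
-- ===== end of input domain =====

-- B replaces A's inner scan over the whole list of found P-positions (per visited cell) by three
-- blocked-index sets (rows/cols/diagonals) with an early return per row; measured much faster, same results.

-- ===== PORT A =====
def reachable (a b x y : Int) : Bool := a == x || b == y || (a - x == b - y)

-- body of A's inner "for j" loop
def innerStepA (i : Int) (p2 : List (Int × Int)) (j : Int) : List (Int × Int) :=
  let check := p2.map (fun cell => reachable i j cell.1 cell.2)
  if !(check.any id) then p2 ++ [(i, j)] else p2

-- body of A's outer "for i" loop (the whole inner loop)
def outerStepA (y : Int) (p2 : List (Int × Int)) (i : Int) : List (Int × Int) :=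
  (PySem.List.pyRange 0 (y + 1) 1).foldl (innerStepA i) p2

def solve (x : Int) (y : Int) : String :=
  if x == 0 || y == 0 || x == y then "1"
  else
    let p2 := (PySem.List.pyRange 0 (x + 1) 1).foldl (outerStepA y) [(1, 2), (2, 1)]
    if p2.contains (x, y) then "2" else "1"

-- ===== PORT B =====
-- Source B's first_free: first j in range(y+1) not blocked by a used column or diagonal (find? = loop with early return)
def first_free (i : Int) (y : Int) (cols : PySem.Set Int) (diags : PySem.Set Int) : Option Int :=
  (PySem.List.pyRange 0 (y + 1) 1).find? (fun j => !(cols.contains j) && !(diags.contains (i - j)))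

-- body of Source B's "for i" loop over the state (rows, cols, diags, members)
def stepB (y : Int) (st : PySem.Set Int × PySem.Set Int × PySem.Set Int × PySem.Set (Int × Int)) (i : Int) :
    PySem.Set Int × PySem.Set Int × PySem.Set Int × PySem.Set (Int × Int) :=
  if st.1.contains i then st
  else
    match first_free i y st.2.1 st.2.2.1 with
    | none => st
    | some j => (PySem.Set.add st.1 i, PySem.Set.add st.2.1 j,
                 PySem.Set.add st.2.2.1 (i - j), PySem.Set.add st.2.2.2 (i, j))

def solve_alt (x : Int) (y : Int) : String :=
  if x == 0 || y == 0 || x == y then "1"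
  else
    let st := (PySem.List.pyRange 0 (x + 1) 1).foldl (stepB y)
      (PySem.Set.ofList [1, 2], PySem.Set.ofList [2, 1], PySem.Set.ofList [-1, 1],
       PySem.Set.ofList [(1, 2), (2, 1)])
    if st.2.2.2.contains (x, y) then "2" else "1"

-- ===== PRECONDITION & SPEC =====
def Spec_solve (x : Int) (y : Int) (out : String) : Prop := out = solve_alt x y
instance (x : Int) (y : Int) (out : String) : Decidable (Spec_solve x y out) := by unfold Spec_solve; infer_instance

-- ===== CLAIM (what is proved, stated in full; the proofs are below) =====
def Claim_equal_solve : Prop := ∀ (x : Int) (y : Int), Dom_solve x y → Spec_solve x y (solve x y)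

-- ===== LEMMAS AND PROOFS =====

-- projections of A's list of found cells: used rows, columns, diagonals
def fsts (p2 : List (Int × Int)) : List Int := p2.map Prod.fst
def snds (p2 : List (Int × Int)) : List Int := p2.map Prod.snd
def dffs (p2 : List (Int × Int)) : List Int := p2.map (fun c => c.1 - c.2)

-- A's per-cell scan of p2 is exactly the three membership tests
theorem check_eq (i j : Int) (p2 : List (Int × Int)) :
    (p2.map (fun cell => reachable i j cell.1 cell.2)).any id = true ↔
      (i ∈ fsts p2 ∨ j ∈ snds p2 ∨ (i - j) ∈ dffs p2) := by
  simp only [List.any_map, List.any_eq_true, Function.comp, id_eq, reachable, Bool.or_eq_true,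
    beq_iff_eq, fsts, snds, dffs, List.mem_map]
  constructor
  · rintro ⟨c, hc, (h | h) | h⟩
    · exact Or.inl ⟨c, hc, h.symm⟩
    · exact Or.inr (Or.inl ⟨c, hc, h.symm⟩)
    · exact Or.inr (Or.inr ⟨c, hc, by omega⟩)
  · rintro (⟨c, hc, h⟩ | ⟨c, hc, h⟩ | ⟨c, hc, h⟩)
    · exact ⟨c, hc, Or.inl (Or.inl h.symm)⟩
    · exact ⟨c, hc, Or.inl (Or.inr h.symm)⟩
    · exact ⟨c, hc, Or.inr (by omega)⟩

-- once row i is used, A's inner loop changes nothing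
theorem inner_blocked (i : Int) (p2 : List (Int × Int)) (hi : i ∈ fsts p2) (js : List Int) :
    js.foldl (innerStepA i) p2 = p2 := by
  induction js with
  | nil => rfl
  | cons j js ih =>
    have hstep : innerStepA i p2 j = p2 := by
      unfold innerStepA
      have h := (check_eq i j p2).mpr (Or.inl hi)
      simp [h]
    simpa [List.foldl_cons, hstep] using ih

-- when row i is free, A's inner loop adds exactly the first unblocked column (Source B's first_free)
theorem inner_free (i : Int) (p2 : List (Int × Int)) (hi : i ∉ fsts p2) (js : List Int) :
    js.foldl (innerStepA i) p2 =
      match js.find? (fun j => !((snds p2).contains j) && !((dffs p2).contains (i - j))) with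
      | none => p2
      | some j => p2 ++ [(i, j)] := by
  induction js with
  | nil => rfl
  | cons j js ih =>
    by_cases hj : (j ∈ snds p2 ∨ (i - j) ∈ dffs p2)
    · have hpred : (!((snds p2).contains j) && !((dffs p2).contains (i - j))) = false := by
        rcases hj with h | h <;> simp [h]
      have hstep : innerStepA i p2 j = p2 := by
        unfold innerStepA
        have h := (check_eq i j p2).mpr (Or.inr (by tauto))
        simp [h]
      rw [List.foldl_cons, hstep, ih, List.find?_cons, hpred]
    · rw [not_or] at hj
      have hpred : (!((snds p2).contains j) && !((dffs p2).contains (i - j))) = true := by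
        simp [hj.1, hj.2]
      have hstep : innerStepA i p2 j = p2 ++ [(i, j)] := by
        unfold innerStepA
        have h : (p2.map (fun cell => reachable i j cell.1 cell.2)).any id = false :=
          Bool.eq_false_iff.mpr (fun hc => by rw [check_eq] at hc; tauto)
        simp [h]
      have hblocked : i ∈ fsts (p2 ++ [(i, j)]) := by simp [fsts]
      rw [List.foldl_cons, hstep, List.find?_cons, hpred,
        inner_blocked i _ hblocked js]

-- one outer step preserves the state correspondence
theorem step_corr (y i : Int) (p2 : List (Int × Int)) :
    stepB y (fsts p2, snds p2, dffs p2, p2) i =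
      (fsts (outerStepA y p2 i), snds (outerStepA y p2 i), dffs (outerStepA y p2 i),
       outerStepA y p2 i) := by
  unfold stepB outerStepA first_free
  by_cases hi : i ∈ fsts p2
  · rw [inner_blocked i p2 hi]
    simp [hi]
  · rw [inner_free i p2 hi]
    simp only [PySem.Set.contains_eq_listContains, List.contains_eq_mem, hi, decide_false,
      Bool.false_eq_true, if_false]
    cases hfind : (PySem.List.pyRange 0 (y + 1) 1).find?
        (fun j => !(decide (j ∈ snds p2)) && !(decide ((i - j) ∈ dffs p2))) with
    | none => rfl
    | some j =>
      have hj := List.find?_some hfind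
      simp only [Bool.and_eq_true, Bool.not_eq_true', decide_eq_false_iff_not] at hj
      have hpm : (i, j) ∉ p2 := fun h => hi (List.mem_map_of_mem h)
      have h1 : i ∉ List.map Prod.fst p2 := hi
      have h2 : j ∉ List.map Prod.snd p2 := hj.1
      have h3 : i - j ∉ List.map (fun c => c.1 - c.2) p2 := hj.2
      simp [PySem.Set.add_of_not_mem h1, PySem.Set.add_of_not_mem h2,
        PySem.Set.add_of_not_mem h3, PySem.Set.add_of_not_mem hpm, fsts, snds, dffs]

-- the whole loop preserves the correspondence
theorem fold_corr (y : Int) (l : List Int) (p2 : List (Int × Int)) :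
    l.foldl (stepB y) (fsts p2, snds p2, dffs p2, p2) =
      (fsts (l.foldl (outerStepA y) p2), snds (l.foldl (outerStepA y) p2),
       dffs (l.foldl (outerStepA y) p2), l.foldl (outerStepA y) p2) := by
  induction l generalizing p2 with
  | nil => rfl
  | cons i l ih => rw [List.foldl_cons, List.foldl_cons, step_corr, ih]

-- ===== VERDICT (by name: the statement is the Claim_ definition above) =====
theorem solve_spec : Claim_equal_solve := by
  unfold Claim_equal_solve
  intro x y _
  unfold Spec_solve solve solve_alt
  by_cases h : (x == 0 || y == 0 || x == y) = true
  · rw [if_pos h, if_pos h]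
  · rw [if_neg h, if_neg h]
    have h0 : (PySem.Set.ofList [(1 : Int), 2], PySem.Set.ofList [(2 : Int), 1],
        PySem.Set.ofList [(-1 : Int), 1], PySem.Set.ofList [((1 : Int), (2 : Int)), (2, 1)]) =
        (fsts [(1, 2), (2, 1)], snds [(1, 2), (2, 1)], dffs [(1, 2), (2, 1)],
         [((1 : Int), (2 : Int)), (2, 1)]) := by decide
    rw [h0, fold_corr]
    rfl
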